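-- pv_equiv track=rewrite | github.com/goksuko/python_studies | LeetCode/q954_canReorderDoubled.py | canReorderDoubled2
-- ===== SOURCE A (Python) =====
-- from typing import List
-- from collections import Counter
--
-- def canReorderDoubled2(arr: List[int]) -> bool:
--     if sum(arr)%3 != 0: return False
--     counter = Counter(arr)
--
--     if 0 in counter:
--         if counter[0]%2: return False
--         counter.pop(0)
--
--     while counter:
--         num = next(iter(counter))
--         while num % 2 == 0 and num//2 in counter:
--             num = num // 2
--         while counter[num] > 0 and 2*num in counter:
--             counter[2*num] -= counter[num]
--             counter.pop(num)
--             num = 2*num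
--         if counter[num] != 0: return False
--         counter.pop(num)
--
--     return True
-- ===== SOURCE B (Python) =====
-- from typing import List
-- from collections import Counter
--
-- def canReorderDoubled2(arr: List[int]) -> bool:
--     cnt = Counter(arr)
--     if cnt[0] % 2:
--         return False
--
--     def need(x):
--         # copies of x that must be matched upward by 2*x
--         if x % 2:
--             return cnt[x]
--         return cnt[x] - need(x // 2)
--
--     return all(need(x) <= cnt[2 * x] for x in cnt if x)
-- ===== Notes on version B (the rewrite author's own statement) =====
-- stated objective: simpler
-- what changed: A's mutating Counter loop that follows halving/doubling chains (pop/insert while-loops) is replaced by a short pure pass: a recursive per-key residual function need(x) = cnt[x] - need(x//2) checked against cnt[2x] for every distinct key, plus an odd-zero-count rejection; A's sum%3 shortcut is dropped since the greedy independently rejects those inputs.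
import Mathlib
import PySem

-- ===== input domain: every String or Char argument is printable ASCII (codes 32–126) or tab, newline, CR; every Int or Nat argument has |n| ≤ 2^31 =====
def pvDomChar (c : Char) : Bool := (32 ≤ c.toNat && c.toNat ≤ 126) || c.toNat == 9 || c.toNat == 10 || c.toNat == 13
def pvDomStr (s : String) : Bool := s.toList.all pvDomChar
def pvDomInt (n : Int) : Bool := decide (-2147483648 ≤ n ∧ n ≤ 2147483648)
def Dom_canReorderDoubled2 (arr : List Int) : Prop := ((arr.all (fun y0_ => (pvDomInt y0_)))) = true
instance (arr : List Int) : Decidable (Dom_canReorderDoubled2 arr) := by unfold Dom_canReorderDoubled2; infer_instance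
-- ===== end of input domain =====

-- B re-implements A's mutating chain-following greedy as a short pure recursion
-- (per-key residual demand), same return value on every input; objective: simpler.

-- ===== PORT A =====
-- inner loop `while num % 2 == 0 and num//2 in counter: num = num//2`
-- (the `num = 0` test is only a totality guard: 0 is never a key of `d` where this is called)
def aDescend (d : PySem.Dict Int Int) (num : Int) : Int :=
  if PySem.Int.mod num 2 = 0 ∧ (d.contains (PySem.Int.floordiv num 2)) = true then
    if _h : num = 0 then num
    else aDescend d (PySem.Int.floordiv num 2)
  else num
termination_by num.natAbs
decreasing_by
  rename_i hg
  obtain ⟨k, hk⟩ := (PySem.Int.mod_eq_zero_iff_dvd num 2).mp hg.1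
  have h2 : PySem.Int.floordiv num 2 = k := by
    rw [PySem.Int.floordiv_eq_ediv_of_pos (by norm_num)]
    omega
  rw [h2]
  omega

-- loop `while counter[num] > 0 and 2*num in counter: …` followed by the
-- `if counter[num] != 0: return False / counter.pop(num)` tail.
-- Fuel-totalised (`none` = fuel ran out; every step pops a key, so `d.size + 1` suffices).
-- result: `some none` = `return False`, `some (some d')` = continue the outer loop with d'.
def aUp : Nat → PySem.Dict Int Int → Int → Option (Option (PySem.Dict Int Int))
  | 0, _, _ => none
  | g+1, d, num =>
    if d.getD num 0 > 0 ∧ d.contains (2*num) = true then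
      aUp g ((d.insert (2*num) (d.getD (2*num) 0 - d.getD num 0)).erase num) (2*num)
    else if d.getD num 0 ≠ 0 then some none
    else some (some (d.erase num))

-- outer loop `while counter:`; `next(iter(counter))` is the first key in insertion order.
def aOuter : Nat → PySem.Dict Int Int → Option Bool
  | 0, _ => none
  | f+1, d =>
    match d.keys with
    | [] => some true
    | k :: _ =>
      match aUp (d.size + 1) d (aDescend d k) with
      | none => none
      | some none => some false
      | some (some d') => aOuter f d'

def aRun (d : PySem.Dict Int Int) : Bool :=
  match aOuter (d.size + 1) d with
  | some b => b
  | none => false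

def canReorderDoubled2 (arr : List Int) : Bool :=
  if PySem.Int.mod arr.sum 3 ≠ 0 then false
  else
    let counter := PySem.Dict.counter arr
    if counter.contains 0 then
      if PySem.Int.mod (counter.getD 0 0) 2 ≠ 0 then false
      else aRun (counter.erase 0)
    else aRun counter

-- ===== PORT B =====
-- `need(x)`: copies of x that must be matched upward by 2*x
-- (the `x = 0` test is only a totality guard: need is never called with x = 0)
def bNeed (cnt : PySem.Dict Int Int) (x : Int) : Int :=
  if PySem.Int.mod x 2 ≠ 0 then cnt.getD x 0
  else if _h : x = 0 then 0
  else cnt.getD x 0 - bNeed cnt (PySem.Int.floordiv x 2)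
termination_by x.natAbs
decreasing_by
  rename_i hmod
  simp only [ne_eq, Decidable.not_not] at hmod
  obtain ⟨k, hk⟩ := (PySem.Int.mod_eq_zero_iff_dvd x 2).mp hmod
  have h2 : PySem.Int.floordiv x 2 = k := by
    rw [PySem.Int.floordiv_eq_ediv_of_pos (by norm_num)]
    omega
  rw [h2]
  omega

def canReorderDoubled2_alt (arr : List Int) : Bool :=
  let cnt := PySem.Dict.counter arr
  if PySem.Int.mod (cnt.getD 0 0) 2 ≠ 0 then false
  else cnt.keys.all (fun x => if x = 0 then true else decide (bNeed cnt x ≤ cnt.getD (2*x) 0))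

-- ===== PRECONDITION & SPEC =====
def Spec_canReorderDoubled2 (arr : List Int) (out : Bool) : Prop := out = canReorderDoubled2_alt arr
instance (arr : List Int) (out : Bool) : Decidable (Spec_canReorderDoubled2 arr out) := by unfold Spec_canReorderDoubled2; infer_instance

-- ===== CLAIM (what is proved, stated in full; the proofs are below) =====
def Claim_equal_canReorderDoubled2 : Prop := ∀ (arr : List Int), Dom_canReorderDoubled2 arr → Spec_canReorderDoubled2 arr (canReorderDoubled2 arr)

-- ===== LEMMAS AND PROOFS =====

-- The residual A's inner `while` loop computes along a chain of PRESENT keys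
-- (bNeed follows the chain regardless of key presence; the crux lemma below relates them).
def segRes (d : PySem.Dict Int Int) (x : Int) : Int :=
  if PySem.Int.mod x 2 ≠ 0 then d.getD x 0
  else if _h : x = 0 then 0
  else if d.contains (PySem.Int.floordiv x 2) then d.getD x 0 - segRes d (PySem.Int.floordiv x 2)
  else d.getD x 0
termination_by x.natAbs
decreasing_by
  rename_i hmod _
  simp only [ne_eq, Decidable.not_not] at hmod
  obtain ⟨k, hk⟩ := (PySem.Int.mod_eq_zero_iff_dvd x 2).mp hmod
  have h2 : PySem.Int.floordiv x 2 = k := by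
    rw [PySem.Int.floordiv_eq_ediv_of_pos (by norm_num)]
    omega
  rw [h2]
  omega

-- what A's chain loop decides about a state d
def SpecSeg (d : PySem.Dict Int Int) : Prop :=
  ∀ x, d.contains x = true → 0 ≤ segRes d x ∧ (d.contains (2*x) = false → segRes d x = 0)

-- what B decides about a state d
def SpecG (d : PySem.Dict Int Int) : Prop :=
  ∀ x, d.contains x = true → bNeed d x ≤ d.getD (2*x) 0

-- invariant of the states A's outer loop visits
def StateInv (d : PySem.Dict Int Int) : Prop :=
  d.keys.Nodup ∧ d.contains 0 = false ∧ ∀ x, d.contains x = true → 1 ≤ d.getD x 0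


-- ---- small arithmetic helpers ----

lemma half_mul_two {x : Int} (h : PySem.Int.mod x 2 = 0) : 2 * PySem.Int.floordiv x 2 = x := by
  obtain ⟨k, hk⟩ := (PySem.Int.mod_eq_zero_iff_dvd x 2).mp h
  rw [PySem.Int.floordiv_eq_ediv_of_pos (by norm_num)]
  omega

lemma floordiv_two_mul (k : Int) : PySem.Int.floordiv (2*k) 2 = k := by
  rw [PySem.Int.floordiv_eq_ediv_of_pos (by norm_num)]
  omega

lemma mod_two_mul (k : Int) : PySem.Int.mod (2*k) 2 = 0 := by
  exact (PySem.Int.mod_eq_zero_iff_dvd _ 2).mpr ⟨k, rfl⟩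

-- ---- facts about Dict.erase (not in the PySem book) ----

lemma contains_erase (d : PySem.Dict Int Int) (k x : Int) :
    (d.erase k).contains x = true ↔ x ≠ k ∧ d.contains x = true := by
  simp only [PySem.Dict.erase, PySem.Dict.contains, List.any_eq_true, List.mem_filter]
  constructor
  · rintro ⟨p, ⟨hp, hne⟩, hx⟩
    refine ⟨?_, p, hp, hx⟩
    simp only [beq_iff_eq] at hx
    simp only [Bool.not_eq_true', beq_eq_false_iff_ne, ne_eq] at hne
    omega
  · rintro ⟨hxk, p, hp, hx⟩
    refine ⟨p, ⟨hp, ?_⟩, hx⟩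
    simp only [beq_iff_eq] at hx
    simp only [Bool.not_eq_true', beq_eq_false_iff_ne, ne_eq]
    omega

lemma getD_erase_of_ne (d : PySem.Dict Int Int) {k x : Int} (h : x ≠ k) (v : Int) :
    (d.erase k).getD x v = d.getD x v := by
  have hfun : (fun (a : Int × Int) => decide ((!(a.1 == k)) = true ∧ (a.1 == x) = true)) = (fun (p : Int × Int) => p.1 == x) := by
    funext p
    by_cases hq : p.1 = x
    · subst hq; simp [h]
    · simp [hq]
  simp only [PySem.Dict.getD, PySem.Dict.get?, PySem.Dict.erase, List.find?_filter, hfun]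

lemma nodup_keys_erase (d : PySem.Dict Int Int) (k : Int) (h : d.keys.Nodup) :
    (d.erase k).keys.Nodup := by
  simp only [PySem.Dict.keys, PySem.Dict.erase] at *
  exact List.Nodup.sublist (List.Sublist.map _ List.filter_sublist) h

lemma size_erase_lt (d : PySem.Dict Int Int) {k : Int} (h : d.contains k = true) :
    (d.erase k).size < d.size := by
  simp only [PySem.Dict.size, PySem.Dict.erase]
  simp only [PySem.Dict.contains, List.any_eq_true] at h
  obtain ⟨p, hp, hpk⟩ := h
  apply List.length_filter_lt_length_iff_exists.mpr
  exact ⟨p, hp, by simp [hpk]⟩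

lemma size_insert_of_contains (d : PySem.Dict Int Int) {k : Int} (v : Int) (h : d.contains k = true) :
    (d.insert k v).size = d.size := by
  simp only [PySem.Dict.size, PySem.Dict.insert, h, if_pos, List.length_map]

-- ---- unfolding equations ----

lemma segRes_odd {d : PySem.Dict Int Int} {x : Int} (h : PySem.Int.mod x 2 ≠ 0) :
    segRes d x = d.getD x 0 := by
  rw [segRes, if_pos h]

lemma segRes_even_in {d : PySem.Dict Int Int} {x : Int} (hm : PySem.Int.mod x 2 = 0)
    (hx : x ≠ 0) (hc : d.contains (PySem.Int.floordiv x 2) = true) :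
    segRes d x = d.getD x 0 - segRes d (PySem.Int.floordiv x 2) := by
  rw [segRes, if_neg (not_not.mpr hm), dif_neg hx, if_pos hc]

lemma segRes_even_out {d : PySem.Dict Int Int} {x : Int} (hm : PySem.Int.mod x 2 = 0)
    (hx : x ≠ 0) (hc : d.contains (PySem.Int.floordiv x 2) = false) :
    segRes d x = d.getD x 0 := by
  rw [segRes, if_neg (not_not.mpr hm), dif_neg hx, if_neg (by rw [hc]; simp)]

lemma segRes_zero (d : PySem.Dict Int Int) : segRes d 0 = 0 := by
  have h : PySem.Int.mod (0:Int) 2 = 0 := (PySem.Int.mod_eq_zero_iff_dvd 0 2).mpr ⟨0, rfl⟩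
  rw [segRes, if_neg (not_not.mpr h), dif_pos rfl]

lemma bNeed_odd {d : PySem.Dict Int Int} {x : Int} (h : PySem.Int.mod x 2 ≠ 0) :
    bNeed d x = d.getD x 0 := by
  rw [bNeed, if_pos h]

lemma bNeed_even {d : PySem.Dict Int Int} {x : Int} (hm : PySem.Int.mod x 2 = 0) (hx : x ≠ 0) :
    bNeed d x = d.getD x 0 - bNeed d (PySem.Int.floordiv x 2) := by
  rw [bNeed, if_neg (not_not.mpr hm), dif_neg hx]

lemma bNeed_zero (d : PySem.Dict Int Int) : bNeed d 0 = 0 := by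
  have h : PySem.Int.mod (0:Int) 2 = 0 := (PySem.Int.mod_eq_zero_iff_dvd 0 2).mpr ⟨0, rfl⟩
  rw [bNeed, if_neg (not_not.mpr h), dif_pos rfl]

-- base of a segment: its residual is just its stored value
lemma segRes_base {d : PySem.Dict Int Int} {b : Int} (hb0 : b ≠ 0)
    (hpred : PySem.Int.mod b 2 = 0 → d.contains (PySem.Int.floordiv b 2) = false) :
    segRes d b = d.getD b 0 := by
  by_cases hm : PySem.Int.mod b 2 = 0
  · exact segRes_even_out hm hb0 (hpred hm)
  · exact segRes_odd hm

-- ---- preservation of segRes across one step of A's inner loop ----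

-- d' differs from d by: key b removed, value at 2*b decreased by segRes d b
lemma segRes_step (d d' : PySem.Dict Int Int) (b : Int)
    (hbin : d.contains b = true)
    (hcont : ∀ x, x ≠ b → (d'.contains x = d.contains x))
    (hcb : d'.contains b = false)
    (hval : ∀ x, x ≠ b → x ≠ 2*b → d'.getD x 0 = d.getD x 0)
    (hv2b : d'.getD (2*b) 0 = d.getD (2*b) 0 - segRes d b) :
    ∀ x, x ≠ b → segRes d' x = segRes d x := by
  have key : ∀ n : Nat, ∀ x : Int, x.natAbs ≤ n → x ≠ b → segRes d' x = segRes d x := by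
    intro n
    induction n with
    | zero =>
      intro x hxn hxb
      have hx0 : x = 0 := by omega
      subst hx0
      rw [segRes_zero, segRes_zero]
    | succ n ih =>
      intro x hxn hxb
      by_cases hm : PySem.Int.mod x 2 = 0
      · by_cases hx0 : x = 0
        · subst hx0; rw [segRes_zero, segRes_zero]
        · by_cases hx2b : x = 2*b
          · have hpx : PySem.Int.floordiv x 2 = b := by rw [hx2b, floordiv_two_mul]
            rw [segRes_even_out hm hx0 (by rw [hpx]; exact (Bool.not_eq_true _).mp (by simp [hcb])),
                segRes_even_in hm hx0 (by rw [hpx]; exact hbin), hpx]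
            rw [← hx2b] at hv2b
            exact hv2b
          · set p := PySem.Int.floordiv x 2 with hp
            have hx2p : x = 2 * p := (half_mul_two hm).symm
            have hpb : p ≠ b := by
              intro h
              exact hx2b (by rw [hx2p, h])
            have hcp : d'.contains p = d.contains p := hcont p hpb
            have hpn : p.natAbs ≤ n := by omega
            by_cases hc : d.contains p = true
            · rw [segRes_even_in hm hx0 (by rw [hcp]; exact hc), segRes_even_in hm hx0 hc,
                  hval x hxb hx2b, ih p hpn hpb]
            · have hc' : d.contains p = false := (Bool.not_eq_true _).mp hc
              rw [segRes_even_out hm hx0 (by rw [hcp]; exact hc'), segRes_even_out hm hx0 hc',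
                  hval x hxb hx2b]
      · have hx2b : x ≠ 2*b := by
          intro h
          rw [h] at hm
          exact hm (mod_two_mul b)
        rw [segRes_odd hm, segRes_odd hm, hval x hxb hx2b]
  intro x hxb
  exact key x.natAbs x le_rfl hxb

lemma specSeg_step (d d' : PySem.Dict Int Int) (b : Int) (hb0 : b ≠ 0)
    (hbin : d.contains b = true)
    (hpred : PySem.Int.mod b 2 = 0 → d.contains (PySem.Int.floordiv b 2) = false)
    (hcont : ∀ x, x ≠ b → (d'.contains x = d.contains x))
    (hcb : d'.contains b = false)
    (hval : ∀ x, x ≠ b → x ≠ 2*b → d'.getD x 0 = d.getD x 0)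
    (hv2b : d'.getD (2*b) 0 = d.getD (2*b) 0 - segRes d b)
    (hclause : 0 ≤ segRes d b ∧ (d.contains (2*b) = false → segRes d b = 0)) :
    SpecSeg d ↔ SpecSeg d' := by
  have hstep := segRes_step d d' b hbin hcont hcb hval hv2b
  constructor
  · intro hs x hx'
    have hxb : x ≠ b := by
      intro e
      rw [e, hcb] at hx'
      exact Bool.false_ne_true hx'
    have hxd : d.contains x = true := by rw [← hcont x hxb]; exact hx'
    have hne2xb : 2*x ≠ b := by
      intro h
      have hmb : PySem.Int.mod b 2 = 0 := by rw [← h]; exact mod_two_mul x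
      have : PySem.Int.floordiv b 2 = x := by rw [← h, floordiv_two_mul]
      have hcf := hpred hmb
      rw [this] at hcf
      rw [hxd] at hcf
      simp at hcf
    obtain ⟨h1, h2⟩ := hs x hxd
    rw [hstep x hxb]
    refine ⟨h1, ?_⟩
    intro h2x'
    apply h2
    rw [← hcont (2*x) hne2xb]
    exact h2x'
  · intro hs' x hxd
    by_cases hxb : x = b
    · subst hxb
      exact hclause
    · have hx' : d'.contains x = true := by rw [hcont x hxb]; exact hxd
      obtain ⟨h1, h2⟩ := hs' x hx'
      rw [← hstep x hxb]
      refine ⟨h1, ?_⟩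
      intro hc2
      have hne2xb : 2*x ≠ b := by
        intro h
        rw [h, hbin] at hc2
        simp at hc2
      apply h2
      rw [hcont (2*x) hne2xb]
      exact hc2

-- ---- A's inner loop ----

lemma aUp_spec : ∀ (g : Nat) (d : PySem.Dict Int Int) (num : Int),
    d.keys.Nodup → d.contains 0 = false → d.contains num = true →
    (PySem.Int.mod num 2 = 0 → d.contains (PySem.Int.floordiv num 2) = false) →
    (∀ x, d.contains x = true → x ≠ num → 1 ≤ d.getD x 0) →
    d.size < g →
    ∃ res, aUp g d num = some res ∧
      ((res = none ∧ ¬ SpecSeg d) ∨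
       ∃ d', res = some d' ∧ (SpecSeg d ↔ SpecSeg d') ∧ d'.size < d.size ∧
         d'.keys.Nodup ∧ d'.contains 0 = false ∧
         (∀ x, d'.contains x = true → 1 ≤ d'.getD x 0)) := by
  intro g
  induction g with
  | zero => intro d num _ _ _ _ _ hsz; omega
  | succ g ih =>
    intro d num hnd hz hnum hpred hvals hsz
    have hnum0 : num ≠ 0 := by
      intro e
      rw [e] at hnum
      rw [hnum] at hz
      simp at hz
    have h2ne : 2*num ≠ num := by omega
    have hsrb : segRes d num = d.getD num 0 := segRes_base hnum0 hpred
    simp only [aUp]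
    by_cases hg : d.getD num 0 > 0 ∧ d.contains (2*num) = true
    · rw [if_pos hg]
      set d1 := (d.insert (2*num) (d.getD (2*num) 0 - d.getD num 0)).erase num with hd1
      have hkeysins := PySem.Dict.keys_insert_of_contains d (d.getD (2*num) 0 - d.getD num 0) hg.2
      have hcont1 : ∀ x, x ≠ num → d1.contains x = d.contains x := by
        intro x hx
        apply Bool.eq_iff_iff.mpr
        rw [hd1, contains_erase]
        constructor
        · rintro ⟨-, hc⟩
          rw [PySem.Dict.contains_insert] at hc
          rcases Bool.or_eq_true_iff.mp hc with h | h
          · rw [beq_iff_eq] at h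
            rw [h]
            exact hg.2
          · exact h
        · intro hc
          refine ⟨hx, ?_⟩
          rw [PySem.Dict.contains_insert, hc, Bool.or_true]
      have hcb1 : d1.contains num = false := by
        apply (Bool.not_eq_true _).mp
        intro hc
        exact ((contains_erase _ _ _).mp hc).1 rfl
      have hval1 : ∀ x, x ≠ num → x ≠ 2*num → d1.getD x 0 = d.getD x 0 := by
        intro x hx hx2
        rw [hd1, getD_erase_of_ne _ hx, PySem.Dict.getD_insert, if_neg hx2]
      have hv2b1 : d1.getD (2*num) 0 = d.getD (2*num) 0 - segRes d num := by
        rw [hd1, getD_erase_of_ne _ h2ne, PySem.Dict.getD_insert, if_pos rfl, hsrb]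
      have hiff : SpecSeg d ↔ SpecSeg d1 := by
        apply specSeg_step d d1 num hnum0 hnum hpred hcont1 hcb1 hval1 hv2b1
        refine ⟨by rw [hsrb]; omega, ?_⟩
        intro hc
        rw [hg.2] at hc
        exact absurd hc (by simp)
      have hnd1 : d1.keys.Nodup := by
        apply nodup_keys_erase
        rw [hkeysins]
        exact hnd
      have hz1 : d1.contains 0 = false := by
        rw [hcont1 0 (by omega)]
        exact hz
      have hin1 : d1.contains (2*num) = true := by
        rw [hcont1 (2*num) h2ne]
        exact hg.2
      have hpred1 : PySem.Int.mod (2*num) 2 = 0 → d1.contains (PySem.Int.floordiv (2*num) 2) = false := by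
        intro _
        rw [floordiv_two_mul]
        exact hcb1
      have hvals1 : ∀ x, d1.contains x = true → x ≠ 2*num → 1 ≤ d1.getD x 0 := by
        intro x hc hx2
        have hxnum : x ≠ num := by
          intro e
          rw [e, hcb1] at hc
          exact Bool.false_ne_true hc
        rw [hval1 x hxnum hx2]
        exact hvals x (by rw [← hcont1 x hxnum]; exact hc) hxnum
      have hszd : 1 ≤ d.size := by
        by_contra hlt
        have h0 : d.size = 0 := by omega
        have : (d.erase num).size < d.size := size_erase_lt d hnum
        omega
      have hsz1 : d1.size < d.size := by
        have h1 : ((d.insert (2*num) (d.getD (2*num) 0 - d.getD num 0))).contains num = true := by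
          rw [PySem.Dict.contains_insert, hnum, Bool.or_true]
        have h2 := size_erase_lt _ h1
        rw [← hd1] at h2
        rw [size_insert_of_contains d _ hg.2] at h2
        exact h2
      obtain ⟨res, hres, hcase⟩ := ih d1 (2*num) hnd1 hz1 hin1 hpred1 hvals1 (by omega)
      refine ⟨res, hres, ?_⟩
      rcases hcase with ⟨hres', hns⟩ | ⟨d', hres', hiff', hsz', hrest⟩
      · exact Or.inl ⟨hres', fun hs => hns (hiff.mp hs)⟩
      · exact Or.inr ⟨d', hres', hiff.trans hiff', by omega, hrest⟩
    · rw [if_neg hg]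
      by_cases hv : d.getD num 0 ≠ 0
      · rw [if_pos hv]
        refine ⟨none, rfl, Or.inl ⟨rfl, ?_⟩⟩
        intro hs
        obtain ⟨h1, h2⟩ := hs num hnum
        rw [hsrb] at h1 h2
        have hvpos : d.getD num 0 > 0 := by omega
        have hc2 : d.contains (2*num) = false := by
          apply (Bool.not_eq_true _).mp
          intro hc
          exact hg ⟨hvpos, hc⟩
        exact hv (h2 hc2)
      · rw [if_neg hv]
        rw [ne_eq, not_not] at hv
        have hcont1 : ∀ x, x ≠ num → (d.erase num).contains x = d.contains x := by
          intro x hx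
          apply Bool.eq_iff_iff.mpr
          rw [contains_erase]
          exact ⟨fun h => h.2, fun h => ⟨hx, h⟩⟩
        have hcb1 : (d.erase num).contains num = false := by
          apply (Bool.not_eq_true _).mp
          intro hc
          exact ((contains_erase _ _ _).mp hc).1 rfl
        have hiff : SpecSeg d ↔ SpecSeg (d.erase num) := by
          apply specSeg_step d _ num hnum0 hnum hpred hcont1 hcb1
          · intro x hx _
            exact getD_erase_of_ne d hx 0
          · rw [getD_erase_of_ne d h2ne, hsrb, hv]
            ring
          · rw [hsrb, hv]
            exact ⟨le_refl 0, fun _ => rfl⟩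
        refine ⟨some (d.erase num), rfl, Or.inr ⟨d.erase num, rfl, hiff, size_erase_lt d hnum, nodup_keys_erase d num hnd, ?_, ?_⟩⟩
        · rw [hcont1 0 (by omega)]
          exact hz
        · intro x hc
          have hxnum : x ≠ num := by
            intro e
            rw [e, hcb1] at hc
            exact Bool.false_ne_true hc
          rw [getD_erase_of_ne d hxnum]
          exact hvals x (by rw [← hcont1 x hxnum]; exact hc) hxnum

-- ---- A's chain descent ----

lemma aDescend_spec : ∀ (d : PySem.Dict Int Int), d.contains 0 = false → ∀ (num : Int),
    d.contains num = true →
    d.contains (aDescend d num) = true ∧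
    (PySem.Int.mod (aDescend d num) 2 = 0 →
      d.contains (PySem.Int.floordiv (aDescend d num) 2) = false) := by
  intro d hz
  have key : ∀ n : Nat, ∀ num : Int, num.natAbs ≤ n → d.contains num = true →
      d.contains (aDescend d num) = true ∧
      (PySem.Int.mod (aDescend d num) 2 = 0 →
        d.contains (PySem.Int.floordiv (aDescend d num) 2) = false) := by
    intro n
    induction n with
    | zero =>
      intro num hn hnum
      have h0 : num = 0 := by omega
      rw [h0] at hnum
      rw [hnum] at hz
      simp at hz
    | succ n ih =>
      intro num hn hnum
      have hnum0 : num ≠ 0 := by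
        intro e
        rw [e] at hnum
        rw [hnum] at hz
        simp at hz
      rw [aDescend]
      by_cases hg : PySem.Int.mod num 2 = 0 ∧ d.contains (PySem.Int.floordiv num 2) = true
      · rw [if_pos hg, dif_neg hnum0]
        have hx2p : num = 2 * PySem.Int.floordiv num 2 := (half_mul_two hg.1).symm
        exact ih (PySem.Int.floordiv num 2) (by omega) hg.2
      · rw [if_neg hg]
        refine ⟨hnum, ?_⟩
        intro hm
        apply (Bool.not_eq_true _).mp
        intro hc
        exact hg ⟨hm, hc⟩
  intro num hnum
  exact key num.natAbs num le_rfl hnum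

-- ---- A's outer loop ----

lemma aOuter_spec : ∀ (f : Nat) (d : PySem.Dict Int Int),
    StateInv d → d.size < f →
    ∃ b, aOuter f d = some b ∧ (b = true ↔ SpecSeg d) := by
  intro f
  induction f with
  | zero => intro d _ hsz; omega
  | succ f ih =>
    intro d hinv hsz
    obtain ⟨hnd, hz, hvals⟩ := hinv
    cases hk : d.keys with
    | nil =>
      refine ⟨true, by simp only [aOuter, hk], ⟨fun _ => ?_, fun _ => rfl⟩⟩
      intro x hc
      have := (PySem.Dict.contains_iff_mem_keys d x).mp hc
      rw [hk] at this
      simp at this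
    | cons k t =>
      have hkin : d.contains k = true := by
        apply (PySem.Dict.contains_iff_mem_keys d k).mpr
        rw [hk]
        exact List.mem_cons_self
      obtain ⟨hbin, hbpred⟩ := aDescend_spec d hz k hkin
      obtain ⟨res, hres, hcase⟩ := aUp_spec (d.size + 1) d (aDescend d k) hnd hz hbin hbpred
        (fun x hx _ => hvals x hx) (Nat.lt_succ_self _)
      simp only [aOuter, hk, hres]
      rcases hcase with ⟨hres', hns⟩ | ⟨d', hres', hiff, hsz', hnd', hz', hvals'⟩
      · subst hres'
        refine ⟨false, rfl, ?_⟩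
        simp only [Bool.false_eq_true, false_iff]
        exact hns
      · subst hres'
        obtain ⟨b, hb, hbiff⟩ := ih d' ⟨hnd', hz', hvals'⟩ (by omega)
        exact ⟨b, hb, hbiff.trans hiff.symm⟩

lemma aRun_spec (d : PySem.Dict Int Int) (h : StateInv d) :
    aRun d = true ↔ SpecSeg d := by
  obtain ⟨b, hb, hiff⟩ := aOuter_spec (d.size + 1) d h (Nat.lt_succ_self _)
  unfold aRun
  rw [hb]
  exact hiff

-- ---- crux: A's per-segment residuals decide the same property as B's bNeed ----

lemma bNeed_eq_segRes_of_specSeg {d : PySem.Dict Int Int} (hs : SpecSeg d) :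
    ∀ x : Int, (d.contains x = true → bNeed d x = segRes d x) ∧
               (d.contains x = false → bNeed d x = 0) := by
  have key : ∀ n : Nat, ∀ x : Int, x.natAbs ≤ n →
      (d.contains x = true → bNeed d x = segRes d x) ∧
      (d.contains x = false → bNeed d x = 0) := by
    intro n
    induction n with
    | zero =>
      intro x hn
      have h0 : x = 0 := by omega
      subst h0
      exact ⟨fun _ => by rw [bNeed_zero, segRes_zero], fun _ => bNeed_zero d⟩
    | succ n ih =>
      intro x hn
      by_cases hx0 : x = 0
      · subst hx0
        exact ⟨fun _ => by rw [bNeed_zero, segRes_zero], fun _ => bNeed_zero d⟩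
      by_cases hm : PySem.Int.mod x 2 = 0
      · set p := PySem.Int.floordiv x 2 with hp
        have hx2p : x = 2 * p := (half_mul_two hm).symm
        have hpn : p.natAbs ≤ n := by omega
        have hbx : bNeed d x = d.getD x 0 - bNeed d p := bNeed_even hm hx0
        constructor
        · intro hc
          by_cases hcp : d.contains p = true
          · rw [hbx, segRes_even_in hm hx0 hcp, (ih p hpn).1 hcp]
          · have hcp' : d.contains p = false := (Bool.not_eq_true _).mp hcp
            rw [hbx, segRes_even_out hm hx0 hcp', (ih p hpn).2 hcp']
            ring
        · intro hc
          have hg0 : d.getD x 0 = 0 := PySem.Dict.getD_of_not_contains d 0 hc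
          by_cases hcp : d.contains p = true
          · have h2p : d.contains (2*p) = false := by rw [← hx2p]; exact hc
            have hsp : segRes d p = 0 := (hs p hcp).2 h2p
            rw [hbx, (ih p hpn).1 hcp, hsp, hg0]
            ring
          · have hcp' : d.contains p = false := (Bool.not_eq_true _).mp hcp
            rw [hbx, (ih p hpn).2 hcp', hg0]
            ring
      · have hbx : bNeed d x = d.getD x 0 := bNeed_odd hm
        exact ⟨fun _ => by rw [hbx, segRes_odd hm],
               fun hc => by rw [hbx, PySem.Dict.getD_of_not_contains d 0 hc]⟩
  intro x
  exact key x.natAbs x le_rfl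

lemma specSeg_to_specG {d : PySem.Dict Int Int} (hz : d.contains 0 = false) (hs : SpecSeg d) : SpecG d := by
  intro x hc
  have hx0 : x ≠ 0 := by
    intro e
    rw [e] at hc
    rw [hc] at hz
    simp at hz
  rw [(bNeed_eq_segRes_of_specSeg hs x).1 hc]
  by_cases hc2 : d.contains (2*x) = true
  · have h2x0 : 2*x ≠ 0 := by omega
    have := (hs (2*x) hc2).1
    rw [segRes_even_in (mod_two_mul x) h2x0 (by rw [floordiv_two_mul]; exact hc), floordiv_two_mul] at this
    omega
  · have hc2' : d.contains (2*x) = false := (Bool.not_eq_true _).mp hc2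
    rw [(hs x hc).2 hc2', PySem.Dict.getD_of_not_contains d 0 hc2']

lemma bNeed_bounds_of_specG {d : PySem.Dict Int Int}
    (hval : ∀ x, d.contains x = false → d.getD x 0 = 0)
    (hpos : ∀ x, 0 ≤ d.getD x 0)
    (hg : SpecG d) :
    ∀ x : Int, x ≠ 0 →
      0 ≤ bNeed d x ∧ bNeed d x ≤ d.getD (2*x) 0 ∧ (d.contains x = false → bNeed d x = 0) := by
  have key : ∀ n : Nat, ∀ x : Int, x.natAbs ≤ n → x ≠ 0 →
      0 ≤ bNeed d x ∧ bNeed d x ≤ d.getD (2*x) 0 ∧ (d.contains x = false → bNeed d x = 0) := by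
    intro n
    induction n with
    | zero => intro x hn hx0; omega
    | succ n ih =>
      intro x hn hx0
      by_cases hm : PySem.Int.mod x 2 = 0
      · set p := PySem.Int.floordiv x 2 with hp
        have hx2p : x = 2 * p := (half_mul_two hm).symm
        have hp0 : p ≠ 0 := by omega
        have hpn : p.natAbs ≤ n := by omega
        obtain ⟨ihp1, ihp2, ihp3⟩ := ih p hpn hp0
        rw [← hx2p] at ihp2
        have hbx : bNeed d x = d.getD x 0 - bNeed d p := bNeed_even hm hx0
        by_cases hc : d.contains x = true
        · exact ⟨by omega, hg x hc, fun h => by rw [h] at hc; exact absurd hc (by simp)⟩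
        · have hc' : d.contains x = false := (Bool.not_eq_true _).mp hc
          have hg0 : d.getD x 0 = 0 := hval x hc'
          have hbx0 : bNeed d x = 0 := by omega
          exact ⟨by omega, by rw [hbx0]; exact hpos (2*x), fun _ => hbx0⟩
      · have hbx : bNeed d x = d.getD x 0 := bNeed_odd hm
        by_cases hc : d.contains x = true
        · exact ⟨by rw [hbx]; exact hpos x, hg x hc, fun h => by rw [h] at hc; exact absurd hc (by simp)⟩
        · have hc' : d.contains x = false := (Bool.not_eq_true _).mp hc
          have hbx0 : bNeed d x = 0 := by rw [hbx]; exact hval x hc'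
          exact ⟨by omega, by rw [hbx0]; exact hpos (2*x), fun _ => hbx0⟩
  intro x hx0
  exact key x.natAbs x le_rfl hx0

lemma specG_to_specSeg {d : PySem.Dict Int Int} (hinv : StateInv d) (hg : SpecG d) : SpecSeg d := by
  obtain ⟨-, hz, hvals⟩ := hinv
  have hval0 : ∀ x, d.contains x = false → d.getD x 0 = 0 := fun x hc => PySem.Dict.getD_of_not_contains d 0 hc
  have hpos : ∀ x, 0 ≤ d.getD x 0 := by
    intro x
    by_cases hc : d.contains x = true
    · have := hvals x hc; omega
    · rw [hval0 x ((Bool.not_eq_true _).mp hc)]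
  have hB := bNeed_bounds_of_specG hval0 hpos hg
  have hseq : ∀ n : Nat, ∀ x : Int, x.natAbs ≤ n → d.contains x = true → segRes d x = bNeed d x := by
    intro n
    induction n with
    | zero =>
      intro x hn hc
      have h0 : x = 0 := by omega
      rw [h0] at hc
      rw [hc] at hz
      simp at hz
    | succ n ih =>
      intro x hn hc
      have hx0 : x ≠ 0 := by
        intro e
        rw [e] at hc
        rw [hc] at hz
        simp at hz
      by_cases hm : PySem.Int.mod x 2 = 0
      · set p := PySem.Int.floordiv x 2 with hp
        have hx2p : x = 2 * p := (half_mul_two hm).symm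
        have hp0 : p ≠ 0 := by omega
        have hpn : p.natAbs ≤ n := by omega
        by_cases hcp : d.contains p = true
        · rw [segRes_even_in hm hx0 hcp, bNeed_even hm hx0, ih p hpn hcp]
        · have hcp' : d.contains p = false := (Bool.not_eq_true _).mp hcp
          rw [segRes_even_out hm hx0 hcp', bNeed_even hm hx0, (hB p hp0).2.2 hcp']
          ring
      · rw [segRes_odd hm, bNeed_odd hm]
  intro x hc
  have hx0 : x ≠ 0 := by
    intro e
    rw [e] at hc
    rw [hc] at hz
    simp at hz
  obtain ⟨h1, h2, -⟩ := hB x hx0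
  have hseq' := hseq x.natAbs x le_rfl hc
  refine ⟨by omega, ?_⟩
  intro hc2
  rw [hval0 (2*x) hc2] at h2
  omega

-- ---- relating the zero-stripped counter to the full counter ----

lemma bNeed_erase_zero (d : PySem.Dict Int Int) :
    ∀ x : Int, x ≠ 0 → bNeed (d.erase 0) x = bNeed d x := by
  have key : ∀ n : Nat, ∀ x : Int, x.natAbs ≤ n → x ≠ 0 → bNeed (d.erase 0) x = bNeed d x := by
    intro n
    induction n with
    | zero => intro x hn hx0; omega
    | succ n ih =>
      intro x hn hx0
      by_cases hm : PySem.Int.mod x 2 = 0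
      · set p := PySem.Int.floordiv x 2 with hp
        have hx2p : x = 2 * p := (half_mul_two hm).symm
        have hp0 : p ≠ 0 := by omega
        rw [bNeed_even hm hx0, bNeed_even hm hx0, getD_erase_of_ne d hx0, ih p (by omega) hp0]
      · rw [bNeed_odd hm, bNeed_odd hm, getD_erase_of_ne d hx0]
  intro x hx0
  exact key x.natAbs x le_rfl hx0

-- ---- the sum-of-triples fact behind A's `sum(arr) % 3` shortcut ----

-- B accepts only multisets that pair off completely as (x, 2x); each pair sums to 3x.
lemma alt_true_iff (arr : List Int) :
    canReorderDoubled2_alt arr = true ↔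
      (PySem.Int.mod ((PySem.Dict.counter arr).getD 0 0) 2 = 0 ∧
       ∀ x, (PySem.Dict.counter arr).contains x = true → x ≠ 0 →
         bNeed (PySem.Dict.counter arr) x ≤ (PySem.Dict.counter arr).getD (2*x) 0) := by
  unfold canReorderDoubled2_alt
  by_cases h0 : PySem.Int.mod ((PySem.Dict.counter arr).getD 0 0) 2 ≠ 0
  · rw [if_pos h0]
    simp only [Bool.false_eq_true, false_iff, not_and]
    intro h
    exact absurd h h0
  · rw [if_neg h0]
    rw [ne_eq, not_not] at h0
    simp only [h0, true_and, List.all_eq_true]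
    constructor
    · intro hall x hc hx0
      have hmem := (PySem.Dict.contains_iff_mem_keys _ x).mp hc
      have := hall x hmem
      rw [if_neg hx0] at this
      exact of_decide_eq_true this
    · intro hall x hmem
      by_cases hx0 : x = 0
      · rw [if_pos hx0]
      · rw [if_neg hx0]
        exact decide_eq_true (hall x ((PySem.Dict.contains_iff_mem_keys _ x).mpr hmem) hx0)

lemma sum_div_three_of_alt_true {arr : List Int} (h : canReorderDoubled2_alt arr = true) :
    (3:Int) ∣ arr.sum := by
  classical
  set c := PySem.Dict.counter arr with hc
  obtain ⟨-, hAll⟩ := (alt_true_iff arr).mp h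
  have hval0 : ∀ x, c.contains x = false → c.getD x 0 = 0 := fun x hx => PySem.Dict.getD_of_not_contains c 0 hx
  have hgetc : ∀ y, c.getD y 0 = (arr.count y : Int) := fun y => PySem.Dict.getD_counter arr y
  have hpos : ∀ x, 0 ≤ c.getD x 0 := by
    intro x
    rw [hgetc]
    positivity
  have hg : SpecG c := by
    intro x hx
    by_cases hx0 : x = 0
    · rw [hx0, bNeed_zero]
      exact hpos (2*0)
    · exact hAll x hx hx0
  have hB := bNeed_bounds_of_specG hval0 hpos hg
  have hcont : ∀ x : Int, c.contains x = true ↔ x ∈ arr := by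
    intro x
    rw [hc, PySem.Dict.contains_counter]
    exact List.contains_iff_mem
  set N : Int → Int := fun x => bNeed c x with hN
  set T := arr.toFinset with hT
  set S' := T.filter (fun x => N x ≠ 0) with hS'
  have hmemT : ∀ x : Int, x ∈ T ↔ 0 < arr.count x := by
    intro x
    rw [hT, List.mem_toFinset, List.count_pos_iff]
  have hN0 : N 0 = 0 := bNeed_zero c
  have step1 : arr.sum = ∑ x ∈ T, (arr.count x : Int) * x := by
    rw [Finset.sum_list_count arr]
    simp only [nsmul_eq_mul]
    rw [hT]
  have step2 : ∀ x ∈ T, (arr.count x : Int) * x =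
      N x * x + (if PySem.Int.mod x 2 = 0 then N (PySem.Int.floordiv x 2) * x else 0) := by
    intro x _
    by_cases hx0 : x = 0
    · subst hx0
      simp
    · by_cases hm : PySem.Int.mod x 2 = 0
      · rw [if_pos hm]
        have heq := bNeed_even (d := c) hm hx0
        rw [← hgetc]
        have hNx : N x = c.getD x 0 - N (PySem.Int.floordiv x 2) := heq
        rw [hNx]
        ring
      · rw [if_neg hm]
        rw [← hgetc]
        have hNx : N x = c.getD x 0 := bNeed_odd hm
        rw [hNx]
        ring
  have step3 : arr.sum = (∑ x ∈ T, N x * x) +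
      ∑ x ∈ T, (if PySem.Int.mod x 2 = 0 then N (PySem.Int.floordiv x 2) * x else 0) := by
    rw [step1, Finset.sum_congr rfl step2, Finset.sum_add_distrib]
  have eqA : ∑ x ∈ S', N x * x = ∑ x ∈ T, N x * x := by
    rw [hS']
    apply Finset.sum_filter_of_ne
    intro x _ hne hNx
    rw [hNx] at hne
    simp at hne
  have hSsub : S'.image (fun y => 2*y) ⊆ T := by
    intro z hz
    obtain ⟨y, hy, rfl⟩ := Finset.mem_image.mp hz
    rw [hS', Finset.mem_filter] at hy
    obtain ⟨hyT, hyN⟩ := hy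
    have hy0 : y ≠ 0 := by
      intro e
      rw [e] at hyN
      exact hyN hN0
    obtain ⟨h1, h2, -⟩ := hB y hy0
    rw [hgetc] at h2
    rw [hmemT]
    have hyN' : bNeed c y ≠ 0 := hyN
    have h4 : 0 < bNeed c y := lt_of_le_of_ne h1 (Ne.symm hyN')
    exact_mod_cast lt_of_lt_of_le h4 h2
  have eqB : ∑ x ∈ T, (if PySem.Int.mod x 2 = 0 then N (PySem.Int.floordiv x 2) * x else 0) =
      ∑ y ∈ S', N y * (2*y) := by
    rw [← Finset.sum_subset hSsub]
    · rw [Finset.sum_image (by intro a _ b _ hab; simp only at hab; omega)]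
      apply Finset.sum_congr rfl
      intro y _
      rw [if_pos (mod_two_mul y), floordiv_two_mul]
    · intro x hxT hxS
      by_cases hm : PySem.Int.mod x 2 = 0
      · rw [if_pos hm]
        by_cases hx0 : x = 0
        · subst hx0
          ring
        set p := PySem.Int.floordiv x 2 with hp
        have hx2p : x = 2 * p := (half_mul_two hm).symm
        have hp0 : p ≠ 0 := by omega
        by_cases hNp : N p = 0
        · rw [hNp]
          ring
        · exfalso
          apply hxS
          apply Finset.mem_image.mpr
          refine ⟨p, ?_, by omega⟩
          rw [hS', Finset.mem_filter]
          refine ⟨?_, hNp⟩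
          rw [hmemT]
          obtain ⟨-, -, h3⟩ := hB p hp0
          by_cases hcp : c.contains p = true
          · have := (hcont p).mp hcp
            exact List.count_pos_iff.mpr this
          · exact absurd (h3 ((Bool.not_eq_true _).mp hcp)) hNp
      · rw [if_neg hm]
  have final : arr.sum = 3 * ∑ x ∈ S', N x * x := by
    rw [step3, ← eqA, eqB, ← Finset.sum_add_distrib, Finset.mul_sum]
    apply Finset.sum_congr rfl
    intro x _
    ring
  exact ⟨_, final⟩

-- ---- assembly ----

lemma counter_stateInv_erase (arr : List Int) :
    StateInv ((PySem.Dict.counter arr).erase 0) := by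
  refine ⟨nodup_keys_erase _ 0 (PySem.Dict.nodup_keys_counter arr), ?_, ?_⟩
  · apply (Bool.not_eq_true _).mp
    intro h
    exact ((contains_erase _ 0 0).mp h).1 rfl
  · intro x hx
    obtain ⟨hx0, hcx⟩ := (contains_erase _ 0 x).mp hx
    rw [getD_erase_of_ne _ hx0, PySem.Dict.getD_counter]
    have hmem : x ∈ arr := by
      rw [← List.contains_iff_mem, ← PySem.Dict.contains_counter]
      exact hcx
    exact_mod_cast List.count_pos_iff.mpr hmem

lemma specG_erase_iff (arr : List Int) :
    SpecG ((PySem.Dict.counter arr).erase 0) ↔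
      (∀ x, (PySem.Dict.counter arr).contains x = true → x ≠ 0 →
        bNeed (PySem.Dict.counter arr) x ≤ (PySem.Dict.counter arr).getD (2*x) 0) := by
  set c := PySem.Dict.counter arr with hc
  constructor
  · intro hG x hcx hx0
    have hdx : (c.erase 0).contains x = true := (contains_erase c 0 x).mpr ⟨hx0, hcx⟩
    have hle := hG x hdx
    rw [bNeed_erase_zero c x hx0, getD_erase_of_ne c (by omega : 2*x ≠ 0)] at hle
    exact hle
  · intro hAll x hdx
    obtain ⟨hx0, hcx⟩ := (contains_erase c 0 x).mp hdx
    have hle := hAll x hcx hx0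
    rw [bNeed_erase_zero c x hx0, getD_erase_of_ne c (by omega : 2*x ≠ 0)]
    exact hle

theorem canReorderDoubled2_spec : Claim_equal_canReorderDoubled2 := by
  intro arr _dom
  unfold Spec_canReorderDoubled2 canReorderDoubled2
  by_cases hsum : PySem.Int.mod arr.sum 3 ≠ 0
  · rw [if_pos hsum]
    cases hBval : canReorderDoubled2_alt arr
    · rfl
    · exact absurd ((PySem.Int.mod_eq_zero_iff_dvd _ 3).mpr (sum_div_three_of_alt_true hBval)) hsum
  · rw [if_neg hsum]
    set c := PySem.Dict.counter arr with hc
    rw [Bool.eq_iff_iff, alt_true_iff arr]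
    set d := c.erase 0 with hd
    have hinvd : StateInv d := counter_stateInv_erase arr
    have hGiff := specG_erase_iff arr
    by_cases h0 : c.contains 0 = true
    · rw [if_pos h0]
      by_cases hodd : PySem.Int.mod (c.getD 0 0) 2 ≠ 0
      · rw [if_pos hodd]
        simp only [Bool.false_eq_true, false_iff, not_and]
        intro h
        exact absurd h hodd
      · rw [if_neg hodd]
        rw [ne_eq, not_not] at hodd
        rw [aRun_spec d hinvd]
        constructor
        · intro hs
          exact ⟨hodd, hGiff.mp (specSeg_to_specG hinvd.2.1 hs)⟩
        · rintro ⟨-, hAll⟩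
          exact specG_to_specSeg hinvd (hGiff.mpr hAll)
    · rw [if_neg h0]
      have h0' : c.contains 0 = false := (Bool.not_eq_true _).mp h0
      have hzero : c.getD 0 0 = 0 := PySem.Dict.getD_of_not_contains c 0 h0'
      have hmod0 : PySem.Int.mod (c.getD 0 0) 2 = 0 := by
        rw [hzero]
        exact (PySem.Int.mod_eq_zero_iff_dvd 0 2).mpr ⟨0, rfl⟩
      have hinvc : StateInv c := by
        refine ⟨PySem.Dict.nodup_keys_counter arr, h0', ?_⟩
        intro x hx
        rw [PySem.Dict.getD_counter]
        have hmem : x ∈ arr := by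
          rw [← List.contains_iff_mem, ← PySem.Dict.contains_counter]
          exact hx
        exact_mod_cast List.count_pos_iff.mpr hmem
      have hGc : SpecG c ↔ (∀ x, c.contains x = true → x ≠ 0 →
          bNeed c x ≤ c.getD (2*x) 0) := by
        constructor
        · exact fun hG x hcx hx0 => hG x hcx
        · intro hAll x hcx
          have hx0 : x ≠ 0 := by
            intro e
            rw [e] at hcx
            rw [hcx] at h0'
            simp at h0'
          exact hAll x hcx hx0
      rw [aRun_spec c hinvc]
      constructor
      · intro hs
        exact ⟨hmod0, hGc.mp (specSeg_to_specG h0' hs)⟩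
      · rintro ⟨-, hAll⟩
        exact specG_to_specSeg hinvc (hGc.mpr hAll)
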